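-- pv_equiv track=rewrite | github.com/ngqm/ee412 | hw3/hw3_2_p3.py | count_other_triangles
-- ===== SOURCE A (Python) =====
-- def preceeds(n1, n2, deg_dict):
--     """Return True if n1 has lower degree than n2
--     or if n1 and n2 have the same degree but n1 < n2;
--     return False otherwise.
--
--     Parameters:
--         n1: int, the first node
--         n2: int, the second node
--         deg_dict: dict[int:int], the hash table for node degrees
--
--     Returns:
--         prec: bool
--     """
--     if deg_dict[n1] < deg_dict[n2]:
--         return True
--     elif deg_dict[n1] == deg_dict[n2] and n1 < n2:
--         return True
--     return False
--
-- def count_other_triangles(deg_dict, edge_dict, edge_set, neighbour_dict, heavy_hitters):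
--     """Count the number of non-heavy-hitter triangles.
--
--     Parameters:
--         deg_dict: dict[int:int], the hash table for node degrees
--         edge_dict: dict[(int,int):int], the hash table for the existence of an edge
--         edge_set: set[(int, int)], the set of edges
--         neighbour_dict: dict[int:set[int]], the hash table for node neighbours
--         heavy_hitters: set[int], the set of heavy hitter nodes
--
--     Returns:
--         count: int, the count of non-heavy-hitter triangles
--     """
--     count = 0
--     for n1, n2 in edge_dict:
--         if n1 in heavy_hitters and n2 in heavy_hitters:
--             continue
--         if not preceeds(n1, n2, deg_dict):
--             n1, n2 = n2, n1
--         for n3 in neighbour_dict[n1]: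
--             x, y = min(n2, n3), max(n2, n3)
--             if (x, y) in edge_set and preceeds(n2, n3, deg_dict):
--                 count += 1
--     return count
-- ===== SOURCE B (Python) =====
-- def count_other_triangles(deg_dict, edge_dict, edge_set, neighbour_dict, heavy_hitters):
--     def key(n):
--         return (deg_dict.get(n, 0), n)
--     # pass 1: orient every canonical edge of edge_set towards its (degree, id)-smaller endpoint
--     succ = {}
--     for x, y in edge_set:
--         if x < y:
--             lo, hi = (x, y) if key(x) < key(y) else (y, x)
--             succ.setdefault(lo, set()).add(hi)
--     # pass 2: for each surviving edge, scan the middle vertex's oriented successors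
--     # against the lowest vertex's neighbourhood
--     count = 0
--     for n1, n2 in edge_dict:
--         if n1 in heavy_hitters and n2 in heavy_hitters:
--             continue
--         a, b = (n1, n2) if key(n1) < key(n2) else (n2, n1)
--         nbrs = neighbour_dict[a]
--         for c in succ.get(b, ()):
--             if c in nbrs:
--                 count += 1
--     return count
-- ===== Notes on version B (the rewrite author's own statement) =====
-- stated objective: alternative
-- what changed: B first makes a staged pass over edge_set, orienting every canonical edge towards its (degree,id)-smaller endpoint into a successor-set dict, and then, per surviving edge of edge_dict, scans the middle vertex's precomputed successors and tests membership in the low vertex's neighbourhood - the inner scan runs over edge_set-derived successor sets instead of neighbour lists, and the per-pair min/max construction and preceeds test disappear from the counting loop.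
import Mathlib
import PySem

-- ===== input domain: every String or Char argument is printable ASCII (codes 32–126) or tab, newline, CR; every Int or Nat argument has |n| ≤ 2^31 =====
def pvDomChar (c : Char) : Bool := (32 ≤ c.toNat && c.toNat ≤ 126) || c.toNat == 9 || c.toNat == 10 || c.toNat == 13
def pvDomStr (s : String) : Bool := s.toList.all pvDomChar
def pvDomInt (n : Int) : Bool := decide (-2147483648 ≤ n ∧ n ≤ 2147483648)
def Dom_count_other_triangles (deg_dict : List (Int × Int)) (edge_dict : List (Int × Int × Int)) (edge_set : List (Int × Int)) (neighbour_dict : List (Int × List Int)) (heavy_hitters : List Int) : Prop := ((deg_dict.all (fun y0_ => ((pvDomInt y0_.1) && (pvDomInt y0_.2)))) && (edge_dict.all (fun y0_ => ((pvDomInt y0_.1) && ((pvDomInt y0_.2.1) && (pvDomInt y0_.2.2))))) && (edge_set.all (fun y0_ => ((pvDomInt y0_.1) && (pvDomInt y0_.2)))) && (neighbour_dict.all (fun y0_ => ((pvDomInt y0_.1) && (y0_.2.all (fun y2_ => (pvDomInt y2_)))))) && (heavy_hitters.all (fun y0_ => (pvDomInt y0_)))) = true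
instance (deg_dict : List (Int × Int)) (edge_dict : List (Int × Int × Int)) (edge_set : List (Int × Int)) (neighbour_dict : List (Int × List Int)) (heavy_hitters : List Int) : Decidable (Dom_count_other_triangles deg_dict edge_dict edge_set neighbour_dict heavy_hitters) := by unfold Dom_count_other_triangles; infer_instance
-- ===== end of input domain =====

-- ===== PORT A =====
-- B restructures the computation: a staged pass orients edge_set into successor sets first,
-- then each surviving edge scans its middle vertex's successors; return value only, no mutation.

-- dict[k] lookup (first match); the default is only reached where the Python raises KeyError,
-- excluded by Pre_.
def pvLookupInt (d : List (Int × Int)) (n : Int) : Int :=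
  ((d.find? (fun p => p.1 == n)).map (fun p => p.2)).getD 0

def pvLookupNbrs (d : List (Int × List Int)) (n : Int) : List Int :=
  ((d.find? (fun p => p.1 == n)).map (fun p => p.2)).getD []

-- literal port of preceeds(n1, n2, deg_dict)
def preceedsP (n1 n2 : Int) (deg_dict : List (Int × Int)) : Bool :=
  if pvLookupInt deg_dict n1 < pvLookupInt deg_dict n2 then true
  else if pvLookupInt deg_dict n1 == pvLookupInt deg_dict n2 && n1 < n2 then true
  else false

def count_other_triangles (deg_dict : List (Int × Int)) (edge_dict : List (Int × Int × Int)) (edge_set : List (Int × Int)) (neighbour_dict : List (Int × List Int)) (heavy_hitters : List Int) : Int :=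
  -- 'for n1, n2 in edge_dict': the dict's distinct key pairs in insertion order
  (PySem.List.dedup (edge_dict.map (fun e => (e.1, e.2.1)))).foldl
    (fun count p =>
      if heavy_hitters.contains p.1 && heavy_hitters.contains p.2 then count
      else
        let q := if preceedsP p.1 p.2 deg_dict then p else (p.2, p.1)
        (pvLookupNbrs neighbour_dict q.1).foldl
          (fun c n3 =>
            if edge_set.contains (min q.2 n3, max q.2 n3) && preceedsP q.2 n3 deg_dict then c + 1
            else c)
          count)
    0

-- ===== PORT B =====
-- key(n) = (deg_dict.get(n, 0), n)
def pvKeyB (deg_dict : List (Int × Int)) (n : Int) : Int × Int := (pvLookupInt deg_dict n, n)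

-- Python's '<' on int 2-tuples, ported by hand (exact lexicographic comparison)
def pvLtKey (p q : Int × Int) : Bool := p.1 < q.1 || (p.1 == q.1 && p.2 < q.2)

def count_other_triangles_alt (deg_dict : List (Int × Int)) (edge_dict : List (Int × Int × Int)) (edge_set : List (Int × Int)) (neighbour_dict : List (Int × List Int)) (heavy_hitters : List Int) : Int :=
  -- pass 1: succ.setdefault(lo, set()).add(hi), i.e. succ[lo] = succ.get(lo, set()) ∪ {hi}
  let succ : PySem.Dict Int (PySem.Set Int) :=
    edge_set.foldl
      (fun d p =>
        if p.1 < p.2 then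
          let q := if pvLtKey (pvKeyB deg_dict p.1) (pvKeyB deg_dict p.2) then p else (p.2, p.1)
          d.modify q.1 PySem.Set.empty (fun s => PySem.Set.add s q.2)
        else d)
      PySem.Dict.empty
  -- pass 2: over the dict's distinct key pairs; the inner loop consumes a Set only through a
  -- count, which is independent of the unmodelled Python set iteration order
  (PySem.List.dedup (edge_dict.map (fun e => (e.1, e.2.1)))).foldl
    (fun count p =>
      if heavy_hitters.contains p.1 && heavy_hitters.contains p.2 then count
      else
        let q := if pvLtKey (pvKeyB deg_dict p.1) (pvKeyB deg_dict p.2) then p else (p.2, p.1)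
        let nbrs := pvLookupNbrs neighbour_dict q.1
        (succ.getD q.2 PySem.Set.empty).foldl
          (fun c n3 => if nbrs.contains n3 then c + 1 else c)
          count)
    0

-- ===== PRECONDITION & SPEC =====
-- Pre_ excludes (a) exactly the inputs on which the Python A raises KeyError: a non-skipped edge
-- whose endpoints miss a degree, whose lower-ordered endpoint has no neighbour entry, or one of
-- whose scanned neighbours that forms an edge misses a degree; and (b) neighbour lists with
-- duplicate entries, which represent no Python input (dict[int:set[int]] values are sets).
def Pre_count_other_triangles (deg_dict : List (Int × Int)) (edge_dict : List (Int × Int × Int)) (edge_set : List (Int × Int)) (neighbour_dict : List (Int × List Int)) (heavy_hitters : List Int) : Prop :=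
  (∀ e ∈ edge_dict, ¬(e.1 ∈ heavy_hitters ∧ e.2.1 ∈ heavy_hitters) →
    e.1 ∈ deg_dict.map (fun p => p.1) ∧ e.2.1 ∈ deg_dict.map (fun p => p.1) ∧
    (let a := if preceedsP e.1 e.2.1 deg_dict then e.1 else e.2.1
     let b := if preceedsP e.1 e.2.1 deg_dict then e.2.1 else e.1
     a ∈ neighbour_dict.map (fun p => p.1) ∧
     ∀ c ∈ pvLookupNbrs neighbour_dict a,
       (min b c, max b c) ∈ edge_set → c ∈ deg_dict.map (fun p => p.1))) ∧
  (∀ p ∈ neighbour_dict, p.2.Nodup)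

instance (deg_dict : List (Int × Int)) (edge_dict : List (Int × Int × Int)) (edge_set : List (Int × Int)) (neighbour_dict : List (Int × List Int)) (heavy_hitters : List Int) : Decidable (Pre_count_other_triangles deg_dict edge_dict edge_set neighbour_dict heavy_hitters) := by unfold Pre_count_other_triangles; infer_instance

def pvWitness_count_other_triangles : (List (Int × Int)) × (List (Int × Int × Int)) × (List (Int × Int)) × (List (Int × List Int)) × List Int :=
  ([(1, 2), (2, 2), (3, 2)], [(1, 2, 1), (1, 3, 1), (2, 3, 1)], [(1, 2), (1, 3), (2, 3)],
   [(1, [2, 3]), (2, [1, 3]), (3, [1, 2])], [])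

def Spec_count_other_triangles (deg_dict : List (Int × Int)) (edge_dict : List (Int × Int × Int)) (edge_set : List (Int × Int)) (neighbour_dict : List (Int × List Int)) (heavy_hitters : List Int) (out : Int) : Prop := out = count_other_triangles_alt deg_dict edge_dict edge_set neighbour_dict heavy_hitters
instance (deg_dict : List (Int × Int)) (edge_dict : List (Int × Int × Int)) (edge_set : List (Int × Int)) (neighbour_dict : List (Int × List Int)) (heavy_hitters : List Int) (out : Int) : Decidable (Spec_count_other_triangles deg_dict edge_dict edge_set neighbour_dict heavy_hitters out) := by unfold Spec_count_other_triangles; infer_instance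

-- ===== CLAIM (what is proved, stated in full; the proofs are below) =====
def Claim_equal_count_other_triangles : Prop := ∀ (deg_dict : List (Int × Int)) (edge_dict : List (Int × Int × Int)) (edge_set : List (Int × Int)) (neighbour_dict : List (Int × List Int)) (heavy_hitters : List Int), Dom_count_other_triangles deg_dict edge_dict edge_set neighbour_dict heavy_hitters → Pre_count_other_triangles deg_dict edge_dict edge_set neighbour_dict heavy_hitters → Spec_count_other_triangles deg_dict edge_dict edge_set neighbour_dict heavy_hitters (count_other_triangles deg_dict edge_dict edge_set neighbour_dict heavy_hitters)

-- ===== LEMMAS AND PROOFS =====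

-- B's precedence test is A's preceeds
theorem ltKey_eq_preceeds (deg_dict : List (Int × Int)) (m n : Int) :
    pvLtKey (pvKeyB deg_dict m) (pvKeyB deg_dict n) = preceedsP m n deg_dict := by
  simp only [pvLtKey, pvKeyB, preceedsP]
  by_cases h1 : pvLookupInt deg_dict m < pvLookupInt deg_dict n <;>
    by_cases h2 : pvLookupInt deg_dict m = pvLookupInt deg_dict n <;>
      by_cases h3 : m < n <;> simp [h1, h2, h3]

-- preceeds is irreflexive and, on distinct nodes, total and asymmetric
theorem preceeds_irrefl (deg_dict : List (Int × Int)) (n : Int) :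
    preceedsP n n deg_dict = false := by
  simp [preceedsP]

theorem preceeds_total (deg_dict : List (Int × Int)) (m n : Int) (h : m ≠ n) :
    preceedsP m n deg_dict = !preceedsP n m deg_dict := by
  simp only [preceedsP]
  split_ifs with h1 h2 h3 h4 h5 h6 h7 <;>
    first
      | rfl
      | (exfalso
         simp only [Bool.and_eq_true, beq_iff_eq, decide_eq_true_eq, not_and, not_lt] at *
         omega)

-- B's orientation step for a candidate pair
def pvOrient (deg_dict : List (Int × Int)) (p : Int × Int) : Int × Int :=
  if pvLtKey (pvKeyB deg_dict p.1) (pvKeyB deg_dict p.2) then p else (p.2, p.1)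

-- A's per-neighbour test for middle vertex b
def pvOk (deg_dict : List (Int × Int)) (edge_set : List (Int × Int)) (b c : Int) : Bool :=
  edge_set.contains (min b c, max b c) && preceedsP b c deg_dict

-- B's pass-1 successor dict
def pvSucc (deg_dict : List (Int × Int)) (edge_set : List (Int × Int)) : PySem.Dict Int (PySem.Set Int) :=
  edge_set.foldl
    (fun d p =>
      if p.1 < p.2 then
        (d.modify (pvOrient deg_dict p).1 PySem.Set.empty (fun s => PySem.Set.add s (pvOrient deg_dict p).2))
      else d)
    PySem.Dict.empty

-- membership in a successor set, over any starting dict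
theorem succ_mem_aux (deg_dict : List (Int × Int)) (es : List (Int × Int))
    (d : PySem.Dict Int (PySem.Set Int)) (b c : Int) :
    c ∈ (es.foldl
      (fun d p =>
        if p.1 < p.2 then
          (d.modify (pvOrient deg_dict p).1 PySem.Set.empty (fun s => PySem.Set.add s (pvOrient deg_dict p).2))
        else d)
      d).getD b PySem.Set.empty ↔
    c ∈ d.getD b PySem.Set.empty ∨ ∃ p ∈ es, p.1 < p.2 ∧ pvOrient deg_dict p = (b, c) := by
  induction es generalizing d with
  | nil => simp
  | cons p t ih =>
    rw [List.foldl_cons]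
    by_cases hp : p.1 < p.2
    · rw [if_pos hp, ih]
      rw [PySem.Dict.getD_modify]
      constructor
      · rintro (h | h)
        · by_cases hb : b = (pvOrient deg_dict p).1
          · rw [if_pos hb] at h
            rcases (PySem.Set.mem_add _ _ _).mp h with h' | h'
            · exact Or.inl (hb ▸ h')
            · exact Or.inr ⟨p, List.mem_cons_self, hp, Prod.ext_iff.mpr ⟨hb.symm, h'.symm⟩⟩
          · rw [if_neg hb] at h
            exact Or.inl h
        · exact Or.inr (by rcases h with ⟨q, hq, h1, h2⟩; exact ⟨q, List.mem_cons_of_mem _ hq, h1, h2⟩)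
      · rintro (h | ⟨q, hq, h1, h2⟩)
        · by_cases hb : b = (pvOrient deg_dict p).1
          · rw [if_pos hb]
            exact Or.inl ((PySem.Set.mem_add _ _ _).mpr (Or.inl (hb ▸ h)))
          · rw [if_neg hb]
            exact Or.inl h
        · rcases List.mem_cons.mp hq with rfl | hq'
          · have hb : b = (pvOrient deg_dict q).1 := by rw [h2]
            rw [if_pos hb]
            exact Or.inl ((PySem.Set.mem_add _ _ _).mpr (Or.inr (by rw [h2])))
          · exact Or.inr ⟨q, hq', h1, h2⟩
    · rw [if_neg hp, ih]
      constructor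
      · rintro (h | ⟨q, hq, h1, h2⟩)
        · exact Or.inl h
        · exact Or.inr ⟨q, List.mem_cons_of_mem _ hq, h1, h2⟩
      · rintro (h | ⟨q, hq, h1, h2⟩)
        · exact Or.inl h
        · rcases List.mem_cons.mp hq with rfl | hq'
          · exact absurd h1 hp
          · exact Or.inr ⟨q, hq', h1, h2⟩

-- every successor set is duplicate-free
theorem succ_nodup_aux (deg_dict : List (Int × Int)) (es : List (Int × Int))
    (d : PySem.Dict Int (PySem.Set Int)) (hd : ∀ b, (d.getD b PySem.Set.empty).Nodup) (b : Int) :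
    ((es.foldl
      (fun d p =>
        if p.1 < p.2 then
          (d.modify (pvOrient deg_dict p).1 PySem.Set.empty (fun s => PySem.Set.add s (pvOrient deg_dict p).2))
        else d)
      d).getD b PySem.Set.empty).Nodup := by
  induction es generalizing d with
  | nil => exact hd b
  | cons p t ih =>
    rw [List.foldl_cons]
    by_cases hp : p.1 < p.2
    · rw [if_pos hp]
      refine ih _ (fun b' => ?_)
      rw [PySem.Dict.getD_modify]
      by_cases hb : b' = (pvOrient deg_dict p).1
      · rw [if_pos hb]
        exact PySem.Set.nodup_add _ _ (hd _)
      · rw [if_neg hb]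
        exact hd b'
    · rw [if_neg hp]
      exact ih d hd

-- A's test holds exactly on the members of the middle vertex's successor set
theorem ok_iff_mem_succ (deg_dict : List (Int × Int)) (edge_set : List (Int × Int)) (b c : Int) :
    pvOk deg_dict edge_set b c = true ↔
      c ∈ (pvSucc deg_dict edge_set).getD b PySem.Set.empty := by
  rw [pvSucc, succ_mem_aux]
  simp only [PySem.Dict.getD_empty, PySem.Set.empty, List.not_mem_nil, false_or]
  constructor
  · intro h
    rcases Bool.and_eq_true_iff.mp h with ⟨hmem, hprec⟩
    have hne : b ≠ c := by
      intro h'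
      rw [h', preceeds_irrefl] at hprec
      exact Bool.false_ne_true hprec
    rcases lt_or_gt_of_ne hne with hlt | hgt
    · refine ⟨(b, c), ?_, by simpa using hlt, ?_⟩
      · have hmm : (min b c, max b c) = (b, c) := by
          simp [min_eq_left hlt.le, max_eq_right hlt.le]
        exact hmm ▸ (List.contains_iff_mem.mp hmem)
      · simp only [pvOrient]
        rw [ltKey_eq_preceeds, if_pos hprec]
    · refine ⟨(c, b), ?_, by simpa using hgt, ?_⟩
      · have hmm : (min b c, max b c) = (c, b) := by
          simp [min_eq_right hgt.le, max_eq_left hgt.le]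
        exact hmm ▸ (List.contains_iff_mem.mp hmem)
      · simp only [pvOrient]
        rw [ltKey_eq_preceeds, preceeds_total deg_dict c b hne.symm, hprec]
        simp
  · rintro ⟨p, hp, hlt, horient⟩
    obtain ⟨x, y⟩ := p
    simp only at hlt
    simp only [pvOrient] at horient
    rw [pvOk]
    by_cases hkey : pvLtKey (pvKeyB deg_dict x) (pvKeyB deg_dict y) = true
    · rw [if_pos hkey] at horient
      injection horient with hb hc
      rw [← hb, ← hc]
      rw [ltKey_eq_preceeds] at hkey
      have hmm : (min x y, max x y) = (x, y) := by
        simp [min_eq_left hlt.le, max_eq_right hlt.le]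
      rw [hmm, hkey, Bool.and_true]
      exact List.contains_iff_mem.mpr hp
    · rw [if_neg hkey] at horient
      injection horient with hb hc
      rw [← hb, ← hc]
      rw [ltKey_eq_preceeds] at hkey
      have hprec : preceedsP y x deg_dict = true := by
        rw [preceeds_total deg_dict y x (ne_of_gt hlt), Bool.eq_false_iff.mpr hkey]
        rfl
      have hmm : (min y x, max y x) = (x, y) := by
        simp [min_eq_right hlt.le, max_eq_left hlt.le]
      rw [hmm, hprec, Bool.and_true]
      exact List.contains_iff_mem.mpr hp

-- counting common elements of two duplicate-free lists is symmetric
theorem countP_mem_symm (L M : List Int) (hL : L.Nodup) (hM : M.Nodup) :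
    L.countP (fun x => M.contains x) = M.countP (fun x => L.contains x) := by
  rw [List.countP_eq_length_filter, List.countP_eq_length_filter]
  have h1 : (L.filter (fun x => M.contains x)).toFinset = L.toFinset ∩ M.toFinset := by
    ext z
    simp
  have h2 : (M.filter (fun x => L.contains x)).toFinset = M.toFinset ∩ L.toFinset := by
    ext z
    simp
  have n1 : (L.filter (fun x => M.contains x)).Nodup := hL.filter _
  have n2 : (M.filter (fun x => L.contains x)).Nodup := hM.filter _
  rw [← List.toFinset_card_of_nodup n1, ← List.toFinset_card_of_nodup n2, h1, h2,
    Finset.inter_comm]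

-- a counting fold is the initial value plus a countP
theorem foldl_count (p : Int → Bool) (l : List Int) (init : Int) :
    l.foldl (fun c x => if p x then c + 1 else c) init = init + (l.countP p : Int) := by
  induction l generalizing init with
  | nil => simp
  | cons x t ih =>
    rw [List.foldl_cons, List.countP_cons]
    by_cases hx : p x = true
    · rw [if_pos hx, ih, if_pos hx]
      push_cast
      ring
    · rw [if_neg hx, ih, if_neg hx]
      push_cast
      ring

-- any looked-up neighbour list is duplicate-free under Pre_
theorem lookupNbrs_nodup (neighbour_dict : List (Int × List Int))
    (h : ∀ p ∈ neighbour_dict, p.2.Nodup) (n : Int) :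
    (pvLookupNbrs neighbour_dict n).Nodup := by
  rw [pvLookupNbrs]
  cases hf : neighbour_dict.find? (fun p => p.1 == n) with
  | none => simp
  | some q =>
    simp only [Option.map_some, Option.getD_some]
    exact h q (List.mem_of_find?_eq_some hf)

-- ===== VERDICT (by name: the statement is the Claim_ definition above) =====
theorem count_other_triangles_spec : Claim_equal_count_other_triangles := by
  intro deg_dict edge_dict edge_set neighbour_dict heavy_hitters _ hpre
  unfold Spec_count_other_triangles
  simp only [count_other_triangles, count_other_triangles_alt]
  have hsucc : (edge_set.foldl
      (fun d p =>
        if p.1 < p.2 then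
          (d.modify (if pvLtKey (pvKeyB deg_dict p.1) (pvKeyB deg_dict p.2) then p else (p.2, p.1)).1
            PySem.Set.empty
            (fun s => PySem.Set.add s (if pvLtKey (pvKeyB deg_dict p.1) (pvKeyB deg_dict p.2) then p else (p.2, p.1)).2))
        else d)
      PySem.Dict.empty) = pvSucc deg_dict edge_set := rfl
  rw [hsucc]
  refine PySem.List.foldl_congr_mem _ _ _ _ (fun count p _ => ?_)
  by_cases hp : (heavy_hitters.contains p.1 && heavy_hitters.contains p.2) = true
  · rw [if_pos hp, if_pos hp]
  · rw [if_neg hp, if_neg hp]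
    simp only [ltKey_eq_preceeds]
    set q := if preceedsP p.1 p.2 deg_dict then p else (p.2, p.1) with hq
    set nbrs := pvLookupNbrs neighbour_dict q.1 with hnbrs
    have hA : nbrs.foldl
        (fun c n3 => if edge_set.contains (min q.2 n3, max q.2 n3) && preceedsP q.2 n3 deg_dict then c + 1 else c)
        count = count + (nbrs.countP (fun n3 => pvOk deg_dict edge_set q.2 n3) : Int) := by
      have h := foldl_count (fun n3 => pvOk deg_dict edge_set q.2 n3) nbrs count
      simpa [pvOk] using h
    have hB : ((pvSucc deg_dict edge_set).getD q.2 PySem.Set.empty).foldl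
        (fun c n3 => if nbrs.contains n3 then c + 1 else c) count =
        count + (((pvSucc deg_dict edge_set).getD q.2 PySem.Set.empty).countP (fun n3 => nbrs.contains n3) : Int) :=
      foldl_count _ _ _
    rw [hA, hB]
    congr 1
    have hmemeq : nbrs.countP (fun n3 => pvOk deg_dict edge_set q.2 n3) =
        nbrs.countP (fun n3 => ((pvSucc deg_dict edge_set).getD q.2 PySem.Set.empty).contains n3) := by
      refine List.countP_congr (fun c _ => ?_)
      rw [ok_iff_mem_succ]
      exact (List.contains_iff_mem).symm
    rw [hmemeq]
    exact_mod_cast countP_mem_symm nbrs _ (lookupNbrs_nodup neighbour_dict hpre.2 q.1)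
      (succ_nodup_aux deg_dict edge_set PySem.Dict.empty (by simp [PySem.Set.empty]) q.2)
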